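-- pv_equiv track=rewrite | github.com/sbrommer/kattis | heroesofvelmar.py | power_level
-- ===== SOURCE A (Python) =====
-- cards = {
--     'Shadow': 6,
--     'Gale': 5,
--     'Ranger': 4,
--     'Anvil': 7,
--     'Vexia': 3,
--     'Guardian': 8,
--     'Thunderheart': 6,
--     'Frostwhisper': 2,
--     'Voidclaw': 3,
--     'Ironwood': 3,
--     'Zenith': 4,
--     'Seraphina': 1
-- }
--
-- def power_level(cs, location):
--     power = sum(cards[c] for c in cs)
--
--     for i, c in enumerate(cs):
--         if c == 'Thunderheart' and len(cs) == 4: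
--             power += 6
--
--         if c == 'Zenith' and location == 1:
--             power += 5
--
--         if c == 'Seraphina':
--             power += len(cs) - 1
--
--     return power
-- ===== SOURCE B (Python) =====
-- cards = {
--     'Shadow': 6,
--     'Gale': 5,
--     'Ranger': 4,
--     'Anvil': 7,
--     'Vexia': 3,
--     'Guardian': 8,
--     'Thunderheart': 6,
--     'Frostwhisper': 2,
--     'Voidclaw': 3,
--     'Ironwood': 3,
--     'Zenith': 4,
--     'Seraphina': 1
-- }
--
-- def power_level(cs, location):
--     # Group the hand by distinct card name first, then score each distinct
--     # name once, weighted by its multiplicity.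
--     counts = {}
--     for c in cs:
--         counts[c] = counts.get(c, 0) + 1
--     n = len(cs)
--     total = 0
--     for name, k in counts.items():
--         total += k * cards[name]
--         if name == 'Thunderheart' and n == 4:
--             total += 6 * k
--         if name == 'Zenith' and location == 1:
--             total += 5 * k
--         if name == 'Seraphina':
--             total += (n - 1) * k
--     return total
-- ===== Notes on version B (the rewrite author's own statement) =====
-- stated objective: alternative
-- what changed: B groups the hand into a name->multiplicity dictionary in one building pass and then scores each DISTINCT card name once (base value plus its bonuses, weighted by multiplicity), instead of A's per-element scoring loop over the hand.
import Mathlib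
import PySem

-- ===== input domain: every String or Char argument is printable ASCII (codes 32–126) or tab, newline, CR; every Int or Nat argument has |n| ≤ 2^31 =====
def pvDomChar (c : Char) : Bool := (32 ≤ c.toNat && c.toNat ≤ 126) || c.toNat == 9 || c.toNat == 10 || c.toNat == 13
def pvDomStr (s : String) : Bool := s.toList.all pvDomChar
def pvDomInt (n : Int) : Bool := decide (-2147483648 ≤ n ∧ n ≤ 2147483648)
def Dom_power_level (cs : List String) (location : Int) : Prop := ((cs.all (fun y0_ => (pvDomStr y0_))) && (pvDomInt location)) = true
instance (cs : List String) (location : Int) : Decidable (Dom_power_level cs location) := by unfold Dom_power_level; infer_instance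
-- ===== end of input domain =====

-- B scores each DISTINCT card name once via a multiplicity dictionary instead of A's per-element loop (objective: alternative).


-- shared module-level constant: the 'cards' dict
def cardsDict : PySem.Dict String Int := PySem.Dict.ofList
  [("Shadow", 6), ("Gale", 5), ("Ranger", 4), ("Anvil", 7), ("Vexia", 3), ("Guardian", 8),
   ("Thunderheart", 6), ("Frostwhisper", 2), ("Voidclaw", 3), ("Ironwood", 3), ("Zenith", 4), ("Seraphina", 1)]

-- ===== PORT A =====
-- cards[c] is ported as getD with default 0; Pre_ restricts to known card names, where this is exact
-- (Python raises KeyError on an unknown name).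
def power_level (cs : List String) (location : Int) : Int :=
  let power : Int := (cs.map (fun c => PySem.Dict.getD cardsDict c 0)).sum
  (PySem.List.enumerate cs).foldl (fun power ic =>
    let c := ic.2
    let power := if c == "Thunderheart" && (cs.length : Int) == 4 then power + 6 else power
    let power := if c == "Zenith" && location == 1 then power + 5 else power
    if c == "Seraphina" then power + ((cs.length : Int) - 1) else power) power

-- ===== PORT B =====
-- 'counts[c] = counts.get(c, 0) + 1' is Dict.insert with Dict.getD; the items loop scores each distinct name once.
def power_level_alt (cs : List String) (location : Int) : Int :=
  let counts : PySem.Dict String Int :=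
    cs.foldl (fun d c => d.insert c (d.getD c 0 + 1)) PySem.Dict.empty
  let n : Int := (cs.length : Int)
  counts.items.foldl (fun total nk =>
    let name := nk.1
    let k := nk.2
    let total := total + k * PySem.Dict.getD cardsDict name 0
    let total := if name == "Thunderheart" && n == 4 then total + 6 * k else total
    let total := if name == "Zenith" && location == 1 then total + 5 * k else total
    if name == "Seraphina" then total + (n - 1) * k else total) 0

-- ===== PRECONDITION & SPEC =====
-- A raises KeyError on any card name not in 'cards'; Pre_ admits exactly hands of known card names.
def Pre_power_level (cs : List String) (location : Int) : Prop :=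
  (cs.all (fun c => ["Shadow", "Gale", "Ranger", "Anvil", "Vexia", "Guardian", "Thunderheart",
                     "Frostwhisper", "Voidclaw", "Ironwood", "Zenith", "Seraphina"].contains c)) = true
instance (cs : List String) (location : Int) : Decidable (Pre_power_level cs location) := by
  unfold Pre_power_level; infer_instance
def pvWitness_power_level : List String × Int := (["Seraphina", "Zenith", "Thunderheart", "Shadow"], 1)

def Spec_power_level (cs : List String) (location : Int) (out : Int) : Prop := out = power_level_alt cs location
instance (cs : List String) (location : Int) (out : Int) : Decidable (Spec_power_level cs location out) := by
  unfold Spec_power_level; infer_instance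

-- ===== CLAIM (what is proved, stated in full; the proofs are below) =====
def Claim_equal_power_level : Prop := ∀ (cs : List String) (location : Int), Dom_power_level cs location → Pre_power_level cs location → Spec_power_level cs location (power_level cs location)

-- ===== LEMMAS AND PROOFS =====

-- the total per-occurrence score of one card, with hand size n and the location fixed
def pvEff (n location : Int) (c : String) : Int :=
  PySem.Dict.getD cardsDict c 0 +
  (if c == "Thunderheart" && n == 4 then 6 else 0) +
  (if c == "Zenith" && location == 1 then 5 else 0) +
  (if c == "Seraphina" then n - 1 else 0)

-- A's loop adds pvEff's bonus part for each element of the hand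
theorem pv_loop_eq (n location : Int) :
    ∀ (l : List String) (s init : Int),
      (PySem.List.enumerate l s).foldl (fun power ic =>
        let c := ic.2
        let power := if c == "Thunderheart" && n == 4 then power + 6 else power
        let power := if c == "Zenith" && location == 1 then power + 5 else power
        if c == "Seraphina" then power + (n - 1) else power) init
      = init + (l.map (fun c => pvEff n location c - PySem.Dict.getD cardsDict c 0)).sum := by
  intro l
  induction l with
  | nil => intro s init; simp [PySem.List.enumerate_nil]
  | cons x xs ih =>
      intro s init
      simp only [PySem.List.enumerate_cons, List.foldl_cons, List.map_cons, List.sum_cons, ih]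
      simp only [pvEff]
      split_ifs <;> ring

-- B's items loop is a plain weighted sum of pvEff over the items
theorem pv_items_loop_eq (n location : Int) (l : List (String × Int)) (init : Int) :
    l.foldl (fun total nk =>
      let name := nk.1
      let k := nk.2
      let total := total + k * PySem.Dict.getD cardsDict name 0
      let total := if name == "Thunderheart" && n == 4 then total + 6 * k else total
      let total := if name == "Zenith" && location == 1 then total + 5 * k else total
      if name == "Seraphina" then total + (n - 1) * k else total) init
    = init + (l.map (fun nk => nk.2 * pvEff n location nk.1)).sum := by
  induction l generalizing init with
  | nil => simp
  | cons x xs ih =>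
      simp only [List.foldl_cons, List.map_cons, List.sum_cons, ih]
      simp only [pvEff]
      split_ifs <;> ring

-- summing 'if y = x then v else 0' over a Nodup list containing x gives v
theorem pv_sum_indicator {α : Type} [DecidableEq α] (s : List α) (x : α) (v : Int)
    (hnd : s.Nodup) (hx : x ∈ s) :
    (s.map (fun y => if y = x then v else 0)).sum = v := by
  induction s with
  | nil => cases hx
  | cons a t ih =>
      rcases List.nodup_cons.mp hnd with ⟨ha, hnt⟩
      rcases List.mem_cons.mp hx with h | h
      · subst h
        have : (t.map (fun y => if y = x then v else 0)) = t.map (fun _ => 0) := by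
          apply List.map_congr_left; intro y hy
          have : y ≠ x := fun e => ha (e ▸ hy)
          simp [this]
        simp [this]
      · have hax : a ≠ x := fun e => ha (e ▸ h)
        simp [hax, ih hnt h]

-- summing count-weighted f over any Nodup superlist of l's elements equals summing f over l
theorem pv_weighted_sum (f : String → Int) (s : List String) (hnd : s.Nodup) :
    ∀ (l : List String), (∀ y ∈ l, y ∈ s) →
      (s.map (fun y => (l.count y : Int) * f y)).sum = (l.map f).sum := by
  intro l
  induction l with
  | nil => intro _; simp
  | cons x xs ih =>
      intro hsub
      have hx : x ∈ s := hsub x (List.mem_cons_self ..)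
      have hxs : ∀ y ∈ xs, y ∈ s := fun y hy => hsub y (List.mem_cons_of_mem _ hy)
      have hstep : (s.map (fun y => ((x :: xs).count y : Int) * f y))
          = s.map (fun y => (xs.count y : Int) * f y + (if y = x then f x else 0)) := by
        apply List.map_congr_left
        intro y _
        by_cases hyx : y = x
        · subst hyx; simp [List.count_cons_self]; ring
        · have : x ≠ y := fun e => hyx e.symm
          simp [List.count_cons_of_ne this, hyx]
      rw [hstep, PySem.List.sum_map_add_int]
      rw [ih hxs, pv_sum_indicator s x (f x) hnd hx]
      simp [add_comm]

-- ===== VERDICT (by name: the statement is the Claim_ definition above) =====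
theorem power_level_spec : Claim_equal_power_level := by
  intro cs location _ _
  unfold Spec_power_level power_level power_level_alt
  rw [PySem.Dict.foldl_insert_getD_add_one_eq_counter]
  rw [pv_items_loop_eq, PySem.Dict.items_counter]
  rw [pv_loop_eq]
  rw [List.map_map]
  have : ((fun nk : String × Int => nk.2 * pvEff (cs.length : Int) location nk.1) ∘
      fun k => (k, (cs.count k : Int))) = fun y => (cs.count y : Int) * pvEff (cs.length : Int) location y := rfl
  rw [this, pv_weighted_sum _ _ (PySem.Set.nodup_ofList cs) cs
      (fun y hy => (PySem.Set.mem_ofList ..).mpr hy)]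
  simp only [zero_add]
  rw [← PySem.List.sum_map_add_int]
  congr 1
  apply List.map_congr_left
  intro c _
  ring
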